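-- pv_equiv track=rewrite | github.com/davidoseihwedieh/ip-ingenuity-protocol | creatorfi/ai_recommendation_system.py | _encode_categories
-- ===== SOURCE A (Python) =====
-- from typing import Dict, List, Tuple, Optional
--
-- def _encode_categories(categories: List[str]) -> List[float]:
--     """Encode category preferences as binary features"""
--     category_mapping = {
--         'tech': 0, 'gaming': 1, 'music': 2, 'art': 3, 'education': 4,
--         'lifestyle': 5, 'business': 6, 'fitness': 7, 'food': 8, 'travel': 9
--     }
--     features = [0] * len(category_mapping)
--     for category in categories:
--         if category.lower() in category_mapping:
--             features[category_mapping[category.lower()]] = 1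
--     return features
-- ===== SOURCE B (Python) =====
-- def _encode_categories(categories):
--     """Encode category preferences as binary features"""
--     present = {c.lower() for c in categories}
--     return [1 if name in present else 0
--             for name in ('tech', 'gaming', 'music', 'art', 'education',
--                          'lifestyle', 'business', 'fitness', 'food', 'travel')]
-- ===== Notes on version B (the rewrite author's own statement) =====
-- stated objective: simpler
-- what changed: Instead of scanning the input and writing 1s into computed indices of a mutable feature list, B lowers the input once into a set and builds the vector by iterating the vocabulary in index order with a membership test.
import Mathlib
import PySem

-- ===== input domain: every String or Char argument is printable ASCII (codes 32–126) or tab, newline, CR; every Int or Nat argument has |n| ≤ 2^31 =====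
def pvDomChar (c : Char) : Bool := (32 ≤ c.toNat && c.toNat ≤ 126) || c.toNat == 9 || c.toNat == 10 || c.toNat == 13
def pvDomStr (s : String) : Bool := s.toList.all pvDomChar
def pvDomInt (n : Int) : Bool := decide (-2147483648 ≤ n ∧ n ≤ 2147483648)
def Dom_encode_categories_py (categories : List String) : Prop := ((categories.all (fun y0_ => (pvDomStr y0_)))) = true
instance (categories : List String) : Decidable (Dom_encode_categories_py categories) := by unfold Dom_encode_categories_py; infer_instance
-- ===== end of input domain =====

-- B builds the 0/1 vector by iterating the fixed vocabulary with a membership set of the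
-- lowered inputs, instead of A's write-into-computed-indices loop over the input (objective: simpler).

-- ===== PORT A =====
-- the dict literal category_mapping
def pvMapping : PySem.Dict String Int := PySem.Dict.ofList
  [("tech", 0), ("gaming", 1), ("music", 2), ("art", 3), ("education", 4),
   ("lifestyle", 5), ("business", 6), ("fitness", 7), ("food", 8), ("travel", 9)]

-- loop body: if category.lower() in category_mapping: features[category_mapping[category.lower()]] = 1
def pvStepA (feats : List Int) (category : String) : List Int :=
  match PySem.Dict.get? pvMapping (PySem.Str.lower category) with
  | some idx => PySem.List.pySetD feats idx 1
  | none => feats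

def encode_categories_py (categories : List String) : List Int :=
  let features : List Int := List.replicate (PySem.Dict.size pvMapping) 0
  categories.foldl pvStepA features

-- ===== PORT B =====
-- the vocabulary tuple of Source B, in index order
def pvVocab : List String :=
  ["tech", "gaming", "music", "art", "education",
   "lifestyle", "business", "fitness", "food", "travel"]

def encode_categories_py_alt (categories : List String) : List Int :=
  let present : PySem.Set String := PySem.Set.ofList (categories.map PySem.Str.lower)
  pvVocab.map (fun name => if PySem.Set.contains present name then (1 : Int) else 0)

-- ===== PRECONDITION & SPEC =====
def Spec_encode_categories_py (categories : List String) (out : List Int) : Prop := out = encode_categories_py_alt categories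
instance (categories : List String) (out : List Int) : Decidable (Spec_encode_categories_py categories out) := by unfold Spec_encode_categories_py; infer_instance

-- ===== CLAIM (what is proved, stated in full; the proofs are below) =====
def Claim_equal_encode_categories_py : Prop := ∀ (categories : List String), Dom_encode_categories_py categories → Spec_encode_categories_py categories (encode_categories_py categories)

-- ===== LEMMAS AND PROOFS =====

-- pvMapping's items, keys and size as literals (used to evaluate the dict operations)
lemma pvItems : pvMapping.items =
    [("tech", 0), ("gaming", 1), ("music", 2), ("art", 3), ("education", 4),
     ("lifestyle", 5), ("business", 6), ("fitness", 7), ("food", 8), ("travel", 9)] := rfl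

lemma pvKeys : PySem.Dict.keys pvMapping = pvVocab := rfl

-- one loop step of A turns the indicator of p into the indicator of p ∨ (· = lower category)
lemma pvStepA_indicator (p : String → Bool) (category : String) :
    pvStepA (pvVocab.map (fun n => if p n then (1 : Int) else 0)) category
      = pvVocab.map (fun n => if (p n || (PySem.Str.lower category == n)) then (1 : Int) else 0) := by
  unfold pvStepA
  by_cases hmem : PySem.Str.lower category ∈ PySem.Dict.keys pvMapping
  · have hv : PySem.Str.lower category ∈ pvVocab := pvKeys ▸ hmem
    simp only [pvVocab, List.mem_cons, List.not_mem_nil, or_false] at hv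
    rcases hv with h | h | h | h | h | h | h | h | h | h <;> rw [h] <;>
      simp [PySem.Dict.get?, pvItems, List.find?, PySem.List.pySetD, PySem.List.pySet?,
        PySem.List.pyIdx?, List.set, pvVocab]
  · have hnone : PySem.Dict.get? pvMapping (PySem.Str.lower category) = none := by
      simpa [PySem.Dict.get?_eq_none_iff_not_mem_keys] using hmem
    rw [hnone]
    refine List.map_congr_left (fun n hn => ?_)
    have : PySem.Str.lower category ≠ n := fun h => hmem (pvKeys ▸ (h ▸ hn))
    simp [this]

-- A's loop, started from the indicator of p, yields the indicator of p ∨ (seen among cats)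
lemma pvLoopA_indicator (cats : List String) (p : String → Bool) :
    cats.foldl pvStepA (pvVocab.map (fun n => if p n then (1 : Int) else 0))
      = pvVocab.map (fun n =>
          if (p n || cats.any (fun c => PySem.Str.lower c == n)) then (1 : Int) else 0) := by
  induction cats generalizing p with
  | nil => simp
  | cons c cs ih =>
      rw [List.foldl_cons, pvStepA_indicator p c, ih]
      refine List.map_congr_left (fun n _ => ?_)
      simp [Bool.or_assoc]

-- ===== VERDICT (by name: the statement is the Claim_ definition above) =====
theorem encode_categories_py_spec : Claim_equal_encode_categories_py := by
  intro categories _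
  show encode_categories_py categories = encode_categories_py_alt categories
  unfold encode_categories_py encode_categories_py_alt
  have hinit : List.replicate (PySem.Dict.size pvMapping) (0 : Int)
      = pvVocab.map (fun n => if (fun _ => false) n then (1 : Int) else 0) := by rfl
  rw [hinit, pvLoopA_indicator]
  refine List.map_congr_left (fun n _ => ?_)
  have hc : (PySem.Set.contains (PySem.Set.ofList (categories.map PySem.Str.lower)) n)
      = categories.any (fun c => PySem.Str.lower c == n) := by
    rw [Bool.eq_iff_iff]
    simp [PySem.Set.mem_ofList, List.mem_map, List.any_eq_true]
  rw [hc]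
  simp
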